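-- pv_equiv track=rewrite | github.com/opendatalab/MinerU | build/lib/magic_pdf/layout/bbox_sort.py | find_left_nearest_bbox
-- ===== SOURCE A (Python) =====
-- X0_IDX = 0
--
-- Y0_IDX = 1
--
-- X1_IDX = 2
--
-- Y1_IDX = 3
--
-- def find_left_nearest_bbox(this_bbox, all_bboxes) -> list:
--     """
--     在all_bboxes里找到所有右侧高度和this_bbox有重叠的bbox
--     """
--     left_boxes = [box for box in all_bboxes if box[X1_IDX] <= this_bbox[X0_IDX] and any([
--          box[Y0_IDX] < this_bbox[Y0_IDX] < box[Y1_IDX], box[Y0_IDX] < this_bbox[Y1_IDX] < box[Y1_IDX],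
--          this_bbox[Y0_IDX] < box[Y0_IDX] < this_bbox[Y1_IDX], this_bbox[Y0_IDX] < box[Y1_IDX] < this_bbox[Y1_IDX],
--          box[Y0_IDX]==this_bbox[Y0_IDX] and box[Y1_IDX]==this_bbox[Y1_IDX]])]
--
--     # 然后再过滤一下，找到水平上距离this_bbox最近的那个
--     if len(left_boxes) > 0:
--         left_boxes.sort(key=lambda x: x[X1_IDX], reverse=True)
--         left_boxes = [left_boxes[0]]
--     else:
--         left_boxes = []
--     return left_boxes
-- ===== SOURCE B (Python) =====
-- X0_IDX = 0
-- Y0_IDX = 1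
-- X1_IDX = 2
-- Y1_IDX = 3
--
-- def find_left_nearest_bbox(this_bbox, all_bboxes) -> list:
--     best = None
--     for box in all_bboxes:
--         if box[X1_IDX] > this_bbox[X0_IDX]:
--             continue
--         by0, by1 = box[Y0_IDX], box[Y1_IDX]
--         y0, y1 = this_bbox[Y0_IDX], this_bbox[Y1_IDX]
--         overlaps = (by0 < y0 < by1 or by0 < y1 < by1
--                     or y0 < by0 < y1 or y0 < by1 < y1
--                     or (by0 == y0 and by1 == y1))
--         if overlaps:
--             if best is None or box[X1_IDX] > best[X1_IDX]:
--                 best = box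
--     return [best] if best is not None else []
-- ===== Notes on version B (the rewrite author's own statement) =====
-- stated objective: simpler
-- what changed: Replaces the filter-comprehension plus stable reverse sort (then taking element 0) with a single pass that keeps one running 'best' candidate, using strict '>' to preserve A's first-among-equal-X1 tie-break.
import Mathlib
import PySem

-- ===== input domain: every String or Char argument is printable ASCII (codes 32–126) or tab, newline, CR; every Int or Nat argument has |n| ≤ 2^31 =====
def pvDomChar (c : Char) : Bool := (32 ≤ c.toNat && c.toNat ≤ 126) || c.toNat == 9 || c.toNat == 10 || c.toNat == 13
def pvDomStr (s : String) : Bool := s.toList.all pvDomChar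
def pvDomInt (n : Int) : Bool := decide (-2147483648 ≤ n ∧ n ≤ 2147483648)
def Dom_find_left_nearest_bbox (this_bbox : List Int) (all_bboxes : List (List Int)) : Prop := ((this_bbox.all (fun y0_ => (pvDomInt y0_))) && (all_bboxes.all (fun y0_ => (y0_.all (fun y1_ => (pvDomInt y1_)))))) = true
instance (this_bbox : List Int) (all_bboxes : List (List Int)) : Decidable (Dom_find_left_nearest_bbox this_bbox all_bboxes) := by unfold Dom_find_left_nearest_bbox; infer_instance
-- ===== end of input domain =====

-- B replaces A's filter-then-stable-reverse-sort with a single pass keeping one running best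
-- candidate (strict '>' keeps A's first-among-equal-X1 tie-break); objective: simpler.

-- ===== PORT A =====
-- indexing helper: Python box[i]; Pre_ guarantees the index is in range, default never used
def pvGet (l : List Int) (i : Int) : Int := PySem.List.pyGetD l i 0

-- the comprehension's condition: box[X1] <= this[X0] and any([five vertical-overlap tests])
def pvAPred (this_bbox box : List Int) : Bool :=
  decide (pvGet box 2 ≤ pvGet this_bbox 0) &&
    (decide (pvGet box 1 < pvGet this_bbox 1 ∧ pvGet this_bbox 1 < pvGet box 3) ||
     decide (pvGet box 1 < pvGet this_bbox 3 ∧ pvGet this_bbox 3 < pvGet box 3) ||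
     decide (pvGet this_bbox 1 < pvGet box 1 ∧ pvGet box 1 < pvGet this_bbox 3) ||
     decide (pvGet this_bbox 1 < pvGet box 3 ∧ pvGet box 3 < pvGet this_bbox 3) ||
     (decide (pvGet box 1 = pvGet this_bbox 1) && decide (pvGet box 3 = pvGet this_bbox 3)))

def find_left_nearest_bbox (this_bbox : List Int) (all_bboxes : List (List Int)) : List (List Int) :=
  let left_boxes := all_bboxes.filter (fun box => pvAPred this_bbox box)
  if left_boxes.length > 0 then
    -- left_boxes.sort(key=lambda x: x[X1_IDX], reverse=True); left_boxes = [left_boxes[0]]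
    match PySem.List.sorted left_boxes (fun x => pvGet x 2) true with
    | [] => []
    | m :: _ => [m]
  else []

-- ===== PORT B =====
def find_left_nearest_bbox_alt (this_bbox : List Int) (all_bboxes : List (List Int)) : List (List Int) :=
  let best := all_bboxes.foldl (fun (best : Option (List Int)) box =>
    if PySem.List.pyGetD box 2 0 > PySem.List.pyGetD this_bbox 0 0 then best  -- continue
    else
      let by0 := PySem.List.pyGetD box 1 0
      let by1 := PySem.List.pyGetD box 3 0
      let y0 := PySem.List.pyGetD this_bbox 1 0
      let y1 := PySem.List.pyGetD this_bbox 3 0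
      let overlaps := decide (by0 < y0 ∧ y0 < by1) || decide (by0 < y1 ∧ y1 < by1) ||
                      decide (y0 < by0 ∧ by0 < y1) || decide (y0 < by1 ∧ by1 < y1) ||
                      (decide (by0 = y0) && decide (by1 = y1))
      if overlaps then
        match best with
        | none => some box
        | some b => if PySem.List.pyGetD box 2 0 > PySem.List.pyGetD b 2 0 then some box else some b
      else best) none
  match best with
  | some b => [b]
  | none => []

-- ===== PRECONDITION & SPEC =====
-- Pre_ is exactly the set of inputs on which Python A returns (A raises IndexError iff some
-- bbox is too short for an index it reaches: box[2]/this[0] always, and box[1], box[3],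
-- this[1], this[3] whenever box[2] <= this[0]).
def Pre_find_left_nearest_bbox (this_bbox : List Int) (all_bboxes : List (List Int)) : Prop :=
  all_bboxes = [] ∨
    (1 ≤ this_bbox.length ∧ ∀ box ∈ all_bboxes, 3 ≤ box.length ∧
      (PySem.List.pyGetD box 2 0 ≤ PySem.List.pyGetD this_bbox 0 0 →
        4 ≤ box.length ∧ 4 ≤ this_bbox.length))
instance (this_bbox : List Int) (all_bboxes : List (List Int)) : Decidable (Pre_find_left_nearest_bbox this_bbox all_bboxes) := by unfold Pre_find_left_nearest_bbox; infer_instance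

def pvWitness_find_left_nearest_bbox : List Int × List (List Int) :=
  ([2, 0, 0, 10], [[0, 0, 1, 5], [0, 3, 2, 8]])

def Spec_find_left_nearest_bbox (this_bbox : List Int) (all_bboxes : List (List Int)) (out : List (List Int)) : Prop := out = find_left_nearest_bbox_alt this_bbox all_bboxes
instance (this_bbox : List Int) (all_bboxes : List (List Int)) (out : List (List Int)) : Decidable (Spec_find_left_nearest_bbox this_bbox all_bboxes out) := by unfold Spec_find_left_nearest_bbox; infer_instance

-- ===== CLAIM (what is proved, stated in full; the proofs are below) =====
def Claim_equal_find_left_nearest_bbox : Prop := ∀ (this_bbox : List Int) (all_bboxes : List (List Int)), Dom_find_left_nearest_bbox this_bbox all_bboxes → Pre_find_left_nearest_bbox this_bbox all_bboxes → Spec_find_left_nearest_bbox this_bbox all_bboxes (find_left_nearest_bbox this_bbox all_bboxes)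

-- ===== LEMMAS AND PROOFS =====

-- the tie-breaking step both sides reduce to: keep the first candidate with maximal X1
def pvStep (best : Option (List Int)) (box : List Int) : Option (List Int) :=
  match best with
  | none => some box
  | some b => if pvGet b 2 < pvGet box 2 then some box else some b

-- B's loop body equals "if A's predicate then pvStep else skip"
lemma pvB_step_eq (this_bbox : List Int) (best : Option (List Int)) (box : List Int) :
    (if PySem.List.pyGetD box 2 0 > PySem.List.pyGetD this_bbox 0 0 then best
     else
      let by0 := PySem.List.pyGetD box 1 0
      let by1 := PySem.List.pyGetD box 3 0
      let y0 := PySem.List.pyGetD this_bbox 1 0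
      let y1 := PySem.List.pyGetD this_bbox 3 0
      let overlaps := decide (by0 < y0 ∧ y0 < by1) || decide (by0 < y1 ∧ y1 < by1) ||
                      decide (y0 < by0 ∧ by0 < y1) || decide (y0 < by1 ∧ by1 < y1) ||
                      (decide (by0 = y0) && decide (by1 = y1))
      if overlaps then
        match best with
        | none => some box
        | some b => if PySem.List.pyGetD box 2 0 > PySem.List.pyGetD b 2 0 then some box else some b
      else best)
    = if pvAPred this_bbox box then pvStep best box else best := by
  simp only [pvAPred, pvGet, pvStep, gt_iff_lt, Bool.and_eq_true, decide_eq_true_eq]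
  by_cases h : PySem.List.pyGetD this_bbox 0 0 < PySem.List.pyGetD box 2 0
  · rw [if_pos h, if_neg]
    rintro ⟨h1, -⟩; omega
  · rw [if_neg h]
    have h' : PySem.List.pyGetD box 2 0 ≤ PySem.List.pyGetD this_bbox 0 0 := by omega
    simp only [h', true_and]
    split
    · rename_i hov; exact (if_pos hov).symm
    · rename_i hov; exact (if_neg hov).symm

-- head of the stable reverse insertion sort = running-first-max fold
lemma pvHead_insert {α κ : Type} [LinearOrder κ] (key : α → κ) (x : α) (acc : List α) :
    (PySem.List.insertBy (fun a b => decide (key b < key a)) x acc).head?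
    = match acc.head? with
      | none => some x
      | some y => if key y < key x then some x else some y := by
  cases acc with
  | nil => rfl
  | cons y ys =>
    simp only [PySem.List.insertBy, List.head?_cons]
    split <;> rename_i hb <;> simp_all

lemma pvHead_foldl {α κ : Type} [LinearOrder κ] (key : α → κ) (l : List α) (acc : List α) :
    (l.foldl (fun acc x => PySem.List.insertBy (fun a b => decide (key b < key a)) x acc) acc).head?
    = l.foldl (fun (o : Option α) x =>
        match o with
        | none => some x
        | some y => if key y < key x then some x else some y) acc.head? := by
  induction l generalizing acc with
  | nil => rfl
  | cons x t ih =>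
    simp only [List.foldl_cons, ih, pvHead_insert]

lemma pvSorted_head (l : List (List Int)) :
    (PySem.List.sorted l (fun x => pvGet x 2) true).head? = l.foldl pvStep none := by
  rw [PySem.List.sorted_rev_eq_foldl_insertBy, pvHead_foldl]
  exact PySem.List.foldl_congr_mem _ _ _ _ (fun o x _ => by cases o <;> rfl)

theorem pv_main (this_bbox : List Int) (all_bboxes : List (List Int)) :
    find_left_nearest_bbox this_bbox all_bboxes = find_left_nearest_bbox_alt this_bbox all_bboxes := by
  unfold find_left_nearest_bbox find_left_nearest_bbox_alt
  have hfold : (all_bboxes.foldl (fun (best : Option (List Int)) box =>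
      if PySem.List.pyGetD box 2 0 > PySem.List.pyGetD this_bbox 0 0 then best
      else
        let by0 := PySem.List.pyGetD box 1 0
        let by1 := PySem.List.pyGetD box 3 0
        let y0 := PySem.List.pyGetD this_bbox 1 0
        let y1 := PySem.List.pyGetD this_bbox 3 0
        let overlaps := decide (by0 < y0 ∧ y0 < by1) || decide (by0 < y1 ∧ y1 < by1) ||
                        decide (y0 < by0 ∧ by0 < y1) || decide (y0 < by1 ∧ by1 < y1) ||
                        (decide (by0 = y0) && decide (by1 = y1))
        if overlaps then
          match best with
          | none => some box
          | some b => if PySem.List.pyGetD box 2 0 > PySem.List.pyGetD b 2 0 then some box else some b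
        else best) none)
      = (all_bboxes.filter (fun box => pvAPred this_bbox box)).foldl pvStep none := by
    rw [List.foldl_filter]
    exact PySem.List.foldl_congr_mem _ _ _ _ (fun acc x _ => pvB_step_eq this_bbox acc x)
  rw [hfold]
  set lf := all_bboxes.filter (fun box => pvAPred this_bbox box) with hlf
  by_cases hne : lf.length > 0
  · rw [if_pos hne]
    have hnil : lf ≠ [] := by
      intro h; rw [h] at hne; simp at hne
    have hs := pvSorted_head lf
    cases hsort : PySem.List.sorted lf (fun x => pvGet x 2) true with
    | nil => exact absurd ((PySem.List.sorted_eq_nil_iff lf _ true).mp hsort) hnil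
    | cons m t =>
      rw [hsort] at hs
      simp only [List.head?_cons] at hs
      rw [← hs]
  · rw [if_neg hne]
    have hz : lf = [] := List.length_eq_zero_iff.mp (by omega)
    rw [hz]
    rfl

-- ===== VERDICT (by name: the statement is the Claim_ definition above) =====
theorem find_left_nearest_bbox_spec : Claim_equal_find_left_nearest_bbox := by
  intro this_bbox all_bboxes _ _
  unfold Spec_find_left_nearest_bbox
  exact pv_main this_bbox all_bboxes
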